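-- pv_equiv track=rewrite | github.com/AI-DA-STC/generative-ai-research-babylm | babylm/tokenizer/utils.py | remove_section_headers
-- ===== SOURCE A (Python) =====
-- def remove_section_headers(text):
--     """
--     Remove text between and including the patterns '= = =' from the text.
--     """
--     cleaned_text = []
--     skip = False
--     for line in text.splitlines():
--         if '= = =' in line:
--             skip = not skip
--             continue
--         if not skip:
--             cleaned_text.append(line)
--     return '\n'.join(cleaned_text)
-- ===== SOURCE B (Python) =====
-- def remove_section_headers(text):
--     """
--     Remove text between and including the patterns '= = =' from the text.
--     """
--     segments = [[]]
--     for line in text.splitlines():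
--         if '= = =' in line:
--             segments.append([])
--         else:
--             segments[-1].append(line)
--     kept = [line for i, seg in enumerate(segments) if i % 2 == 0 for line in seg]
--     return '\n'.join(kept)
-- ===== Notes on version B (the rewrite author's own statement) =====
-- stated objective: alternative
-- what changed: Replaces the per-line skip-boolean toggle with a partition of the lines into '= = ='-delimited segments followed by selecting the even-indexed segments and joining their lines.
import Mathlib
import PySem

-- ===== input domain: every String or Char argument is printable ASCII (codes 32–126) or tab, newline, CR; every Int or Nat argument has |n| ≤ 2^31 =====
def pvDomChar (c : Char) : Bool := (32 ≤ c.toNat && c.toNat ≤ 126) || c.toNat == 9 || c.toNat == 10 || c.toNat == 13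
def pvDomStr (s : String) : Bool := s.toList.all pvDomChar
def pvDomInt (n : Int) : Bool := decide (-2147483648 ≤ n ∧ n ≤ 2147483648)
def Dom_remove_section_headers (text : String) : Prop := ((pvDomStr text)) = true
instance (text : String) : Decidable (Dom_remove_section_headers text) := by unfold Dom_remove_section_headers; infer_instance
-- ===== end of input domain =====

-- B partitions the lines into '= = ='-delimited segments and keeps the even-indexed
-- segments, instead of A's per-line skip toggle (alternative decomposition, same cost).

-- shared by both ports: the test  '= = =' in line
def pvDelim (line : String) : Bool := PySem.Str.isIn "= = =" line

-- ===== PORT A =====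
-- loop body of A: toggle skip on a delimiter line, else append when not skipping
def pvStepA (st : List String × Bool) (line : String) : List String × Bool :=
  if pvDelim line then (st.1, !st.2)
  else if st.2 then st else (st.1 ++ [line], st.2)

def remove_section_headers (text : String) : String :=
  let r := (PySem.Str.splitlines text).foldl pvStepA ([], false)
  PySem.Str.join "\n" r.1

-- ===== PORT B =====
-- loop body of B: start a new segment on a delimiter line, else extend the current one
def pvStepB (st : List (List String) × List String) (line : String) :
    List (List String) × List String :=
  if pvDelim line then (st.1 ++ [st.2], [])
  else (st.1, st.2 ++ [line])

def remove_section_headers_alt (text : String) : String :=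
  let st := (PySem.Str.splitlines text).foldl pvStepB ([], [])
  let segments := st.1 ++ [st.2]
  let kept := ((PySem.List.enumerate segments).filter
      (fun p => PySem.Int.mod p.1 2 == 0)).flatMap (fun p => p.2)
  PySem.Str.join "\n" kept

-- ===== PRECONDITION & SPEC =====
def Spec_remove_section_headers (text : String) (out : String) : Prop := out = remove_section_headers_alt text
instance (text : String) (out : String) : Decidable (Spec_remove_section_headers text out) := by unfold Spec_remove_section_headers; infer_instance

-- ===== CLAIM (what is proved, stated in full; the proofs are below) =====
def Claim_equal_remove_section_headers : Prop := ∀ (text : String), Dom_remove_section_headers text → Spec_remove_section_headers text (remove_section_headers text)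

-- ===== LEMMAS AND PROOFS =====

-- the lines kept starting from a given skip state (characterises A's loop)
def pvSpecF (lines : List String) (skip : Bool) : List String :=
  match lines with
  | [] => []
  | l :: r =>
    if pvDelim l then pvSpecF r (!skip)
    else if skip then pvSpecF r skip else l :: pvSpecF r skip

-- the segment list B's loop produces, from a given current segment
def pvSegs (lines : List String) (cur : List String) : List (List String) :=
  match lines with
  | [] => [cur]
  | l :: r =>
    if pvDelim l then cur :: pvSegs r []
    else pvSegs r (cur ++ [l])

-- flatten the segments whose parity flag is true, alternating
def pvFlatPar (b : Bool) (S : List (List String)) : List String :=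
  match S with
  | [] => []
  | a :: r => (if b then a else []) ++ pvFlatPar (!b) r

theorem pvFoldA (lines : List String) (acc : List String) (skip : Bool) :
    (lines.foldl pvStepA (acc, skip)).1 = acc ++ pvSpecF lines skip := by
  induction lines generalizing acc skip with
  | nil => simp [pvSpecF]
  | cons l r ih =>
    simp only [List.foldl_cons, pvStepA, pvSpecF]
    by_cases h : pvDelim l = true
    · simp [h, ih]
    · cases skip <;> simp [h, ih]

theorem pvFoldB (lines : List String) (segs : List (List String)) (cur : List String) :
    (lines.foldl pvStepB (segs, cur)).1 ++ [(lines.foldl pvStepB (segs, cur)).2]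
      = segs ++ pvSegs lines cur := by
  induction lines generalizing segs cur with
  | nil => simp [pvSegs]
  | cons l r ih =>
    simp only [List.foldl_cons, pvStepB, pvSegs]
    by_cases h : pvDelim l = true
    · simp [h, ih]
    · simp [h, ih]

theorem pvModTwoFlip (n : Int) :
    (PySem.Int.mod (n + 1) 2 == 0) = !(PySem.Int.mod n 2 == 0) := by
  rw [PySem.Int.mod_eq_emod_of_pos (show (0:Int) < 2 by norm_num),
      PySem.Int.mod_eq_emod_of_pos (show (0:Int) < 2 by norm_num)]
  rcases Int.emod_two_eq n with h | h
  · have h2 : (n + 1) % 2 = 1 := by omega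
    simp [h, h2]
  · have h2 : (n + 1) % 2 = 0 := by omega
    simp [h, h2]

theorem pvEnumFilter (S : List (List String)) (n : Int) :
    ((PySem.List.enumerate S n).filter (fun p => PySem.Int.mod p.1 2 == 0)).flatMap
        (fun p => p.2)
      = pvFlatPar (PySem.Int.mod n 2 == 0) S := by
  induction S generalizing n with
  | nil => rfl
  | cons a r ih =>
    have hstep : PySem.List.enumerate (a :: r) n = (n, a) :: PySem.List.enumerate r (n + 1) := rfl
    rw [hstep, List.filter_cons]
    by_cases h : (PySem.Int.mod n 2 == 0) = true
    · simp only [h, if_true, List.flatMap_cons, ih, pvModTwoFlip, pvFlatPar]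
    · simp only [Bool.not_eq_true] at h
      simp only [h, Bool.false_eq_true, if_false, ih, pvModTwoFlip, pvFlatPar,
        Bool.not_false, List.nil_append]

theorem pvFlatSegs (lines : List String) (cur : List String) :
    pvFlatPar true (pvSegs lines cur) = cur ++ pvSpecF lines false ∧
    pvFlatPar false (pvSegs lines cur) = pvSpecF lines true := by
  induction lines generalizing cur with
  | nil => simp [pvSegs, pvFlatPar, pvSpecF]
  | cons l r ih =>
    simp only [pvSegs, pvSpecF]
    by_cases h : pvDelim l = true
    · simp only [h, if_true, pvFlatPar]
      constructor
      · simp [(ih []).2]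
      · simp [(ih []).1]
    · simp only [h, Bool.false_eq_true, if_false]
      constructor
      · rw [(ih (cur ++ [l])).1]; simp
      · exact (ih (cur ++ [l])).2

-- ===== VERDICT (by name: the statement is the Claim_ definition above) =====
theorem remove_section_headers_spec : Claim_equal_remove_section_headers := by
  intro text _
  unfold Spec_remove_section_headers remove_section_headers remove_section_headers_alt
  simp only
  rw [pvFoldA, pvFoldB, pvEnumFilter]
  have h0 : (PySem.Int.mod (0 : Int) 2 == 0) = true := by decide
  rw [h0]
  simp only [List.nil_append]
  rw [(pvFlatSegs (PySem.Str.splitlines text) []).1]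
  simp
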